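-- pv_equiv track=rewrite | github.com/arkhan19/DailyCoding | Amazon/MinStockp.py | findEarliestMonth
-- ===== SOURCE A (Python) =====
-- def findEarliestMonth(stockPrice):
--     totalStockPrice = sum(stockPrice)
--     minNetPrice = float('inf')
--     earliestMonth = -1
--     n = len(stockPrice)
--
--     # Start with 0
--     leftSum = 0
--     # Start with totalSum
--     rightSum = totalStockPrice
--
--     for i in range(1, n):
--         # Average of first i months - Average of rest of the months
--         # Sum of First i months
--         leftSum+=stockPrice[i-1]
--         # Sum of rest of the months
--         rightSum-=stockPrice[i-1]
--         # Net Price from the definition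
--         netPrice = abs((leftSum//i - rightSum//(n-i)))
--
--         # Update the netprice
--         if minNetPrice > netPrice:
--             minNetPrice = netPrice
--             earliestMonth = i
--     return earliestMonth
-- ===== SOURCE B (Python) =====
-- def findEarliestMonth(stockPrice):
--     n = len(stockPrice)
--     total = sum(stockPrice)
--     # build suffix sums back-to-front: after reversing, suffix[i] = stockPrice[i] + ... + stockPrice[n-1]
--     suffix = [0]
--     for p in reversed(stockPrice):
--         suffix.append(suffix[-1] + p)
--     suffix.reverse()
--     # materialize (netPrice, month) pairs; builtin lexicographic min picks the
--     # smallest net price and, on ties, the earliest month automatically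
--     cands = [(abs((total - suffix[i]) // i - suffix[i] // (n - i)), i)
--              for i in range(1, n)]
--     if not cands:
--         return -1
--     return min(cands)[1]
-- ===== Notes on version B (the rewrite author's own statement) =====
-- stated objective: alternative
-- what changed: B builds suffix sums back-to-front, materializes the (netPrice, month) candidate pairs, and selects the answer with the builtin lexicographic min over pairs (ties broken toward the earliest month by the pair order), instead of A's forward running-sum loop with a strict '>' minimum update.
import Mathlib
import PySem

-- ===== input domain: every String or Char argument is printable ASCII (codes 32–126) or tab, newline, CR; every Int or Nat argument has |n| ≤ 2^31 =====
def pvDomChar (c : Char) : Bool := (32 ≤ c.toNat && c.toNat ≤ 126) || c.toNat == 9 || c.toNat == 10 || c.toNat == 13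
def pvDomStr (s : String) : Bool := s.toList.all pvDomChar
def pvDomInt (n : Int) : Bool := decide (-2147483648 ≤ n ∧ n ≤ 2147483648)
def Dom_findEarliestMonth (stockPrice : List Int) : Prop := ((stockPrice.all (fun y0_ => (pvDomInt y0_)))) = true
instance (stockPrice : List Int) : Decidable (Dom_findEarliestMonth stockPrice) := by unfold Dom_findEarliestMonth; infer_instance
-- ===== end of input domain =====

-- B builds suffix sums back-to-front, materializes the (netPrice, month) pairs and selects
-- the answer with a lexicographic min over pairs, instead of A's forward running-sum loop
-- with a strict '>' minimum update; same cost, different decomposition.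

-- ===== PORT A =====
-- A's loop body; state = (leftSum, rightSum, minNetPrice, earliestMonth).
-- float('inf') is modelled as `none` in an `Option Int` minimum: `inf > netPrice` is
-- always true for the integer netPrice, exactly the `none => true` branch.
-- stockPrice[i-1] is in range for every i in range(1, n), so pyGetD is exact here.
def stepA (stockPrice : List Int) (n : Int) (st : Int × Int × Option Int × Int) (i : Int) :
    Int × Int × Option Int × Int :=
  let leftSum := st.1 + PySem.List.pyGetD stockPrice (i - 1) 0
  let rightSum := st.2.1 - PySem.List.pyGetD stockPrice (i - 1) 0
  let netPrice := |PySem.Int.floordiv leftSum i - PySem.Int.floordiv rightSum (n - i)|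
  if (match st.2.2.1 with | none => true | some m => decide (netPrice < m)) = true
  then (leftSum, rightSum, some netPrice, i)
  else (leftSum, rightSum, st.2.2.1, st.2.2.2)

def findEarliestMonth (stockPrice : List Int) : Int :=
  let totalStockPrice := stockPrice.sum
  let n : Int := stockPrice.length
  ((PySem.List.pyRange 1 n 1).foldl (stepA stockPrice n) (0, totalStockPrice, .none, -1)).2.2.2

-- ===== PORT B =====
-- suffix[-1] and suffix[i] are always in range here, so pyGetD is exact;
-- min(cands) with no key compares the pairs lexicographically and returns the first
-- minimum: PySem.List.min2? with the two pair projections; the empty-candidates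
-- guard is the `none` branch of the match.
def findEarliestMonth_alt (stockPrice : List Int) : Int :=
  let n : Int := stockPrice.length
  let total := stockPrice.sum
  let suffix :=
    (stockPrice.reverse.foldl (fun acc p => acc ++ [PySem.List.pyGetD acc (-1) 0 + p]) [0]).reverse
  let cands := (PySem.List.pyRange 1 n 1).map (fun i =>
    (|PySem.Int.floordiv (total - PySem.List.pyGetD suffix i 0) i -
       PySem.Int.floordiv (PySem.List.pyGetD suffix i 0) (n - i)|, i))
  match PySem.List.min2? cands (fun c => c.1) (fun c => c.2) with
  | none => -1
  | some c => c.2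

-- ===== PRECONDITION & SPEC =====
def Spec_findEarliestMonth (stockPrice : List Int) (out : Int) : Prop := out = findEarliestMonth_alt stockPrice
instance (stockPrice : List Int) (out : Int) : Decidable (Spec_findEarliestMonth stockPrice out) := by unfold Spec_findEarliestMonth; infer_instance

-- ===== CLAIM (what is proved, stated in full; the proofs are below) =====
def Claim_equal_findEarliestMonth : Prop := ∀ (stockPrice : List Int), Dom_findEarliestMonth stockPrice → Spec_findEarliestMonth stockPrice (findEarliestMonth stockPrice)

-- ===== LEMMAS AND PROOFS =====

/-- Partial sums of `xs` starting from accumulated value `s`. -/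
def psums (s : Int) : List Int → List Int
  | [] => []
  | p :: t => (s + p) :: psums (s + p) t

theorem psums_length (xs : List Int) : ∀ s : Int, (psums s xs).length = xs.length := by
  induction xs with
  | nil => intro s; rfl
  | cons p t ih => intro s; simp [psums, ih]

/-- B's first loop builds exactly `acc ++ [s] ++` the partial sums continuing from `s`. -/
theorem prefix_fold (xs : List Int) :
    ∀ (acc : List Int) (s : Int),
      xs.foldl (fun acc p => acc ++ [PySem.List.pyGetD acc (-1) 0 + p]) (acc ++ [s])
        = acc ++ [s] ++ psums s xs := by
  induction xs with
  | nil => intro acc s; simp [psums]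
  | cons p t ih =>
    intro acc s
    simp only [List.foldl_cons, PySem.List.pyGetD_neg_one_append_singleton, psums]
    have := ih (acc ++ [s]) (s + p)
    simpa using this

theorem psums_getD (xs : List Int) :
    ∀ (s : Int) (k : Nat), k < xs.length →
      (psums s xs).getD k 0 = s + (xs.take (k + 1)).sum := by
  induction xs with
  | nil => intro s k h; simp at h
  | cons p t ih =>
    intro s k h
    cases k with
    | zero => simp [psums]
    | succ k =>
      simp only [psums, List.getD_cons_succ, List.take_succ_cons, List.sum_cons]
      rw [ih (s + p) k (by simpa using h)]
      ring

/-- Reading the table built from `ys` at position `k` gives the sum of the first `k` entries. -/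
theorem pre_getD (ys : List Int) (k : Nat) (hk : k ≤ ys.length) :
    (0 :: psums 0 ys).getD k 0 = (ys.take k).sum := by
  cases k with
  | zero => simp
  | succ k =>
    simp only [List.getD_cons_succ]
    rw [psums_getD ys 0 k (by omega)]
    simp

/-- B's suffix table read at `k` is the sum of the prices from month `k` on. -/
theorem suffix_getD (xs : List Int) (k : Nat) (hk : k ≤ xs.length) :
    ((0 :: psums 0 xs.reverse).reverse).getD k 0 = (xs.drop k).sum := by
  have hlen : (0 :: psums 0 xs.reverse).length = xs.length + 1 := by
    simp [psums_length]
  have hk' : k < (0 :: psums 0 xs.reverse).reverse.length := by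
    rw [List.length_reverse, hlen]; omega
  rw [List.getD_eq_getElem _ _ hk', List.getElem_reverse hk']
  have h2 : (0 :: psums 0 xs.reverse).length - 1 - k = xs.length - k := by omega
  have h3 : xs.length - k < (0 :: psums 0 xs.reverse).length := by omega
  have hp := pre_getD xs.reverse (xs.length - k) (by rw [List.length_reverse]; omega)
  rw [List.getD_eq_getElem _ _ h3] at hp
  simp only [h2]
  rw [hp]
  have htk : xs.reverse.take (xs.length - k) = (xs.drop k).reverse :=
    (List.reverse_drop ..).symm
  rw [htk, List.sum_reverse]

theorem sum_take_succ_getD (xs : List Int) (k : Nat) (hk : k < xs.length) :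
    (xs.take (k + 1)).sum = (xs.take k).sum + xs.getD k 0 := by
  rw [List.sum_take_succ xs k hk]
  simp [List.getD_eq_getElem?_getD, List.getElem?_eq_getElem hk]

/-- A's minimum-update step, with the running sums abstracted away:
state = (minNetPrice, earliestMonth), candidate = (netPrice, month). -/
def stepS (st : Option Int × Int) (c : Int × Int) : Option Int × Int :=
  if (match st.1 with | none => true | some m => decide (c.1 < m)) = true
  then (some c.1, c.2) else st

/-- The fold step of `PySem.List.min2?` on pairs (first lexicographic minimum). -/
def stepM (acc : Option (Int × Int)) (x : Int × Int) : Option (Int × Int) :=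
  match acc with
  | none => some x
  | some m =>
    if (decide (x.1 < m.1) || !decide (m.1 < x.1) && decide (x.2 < m.2)) = true
    then some x else some m

/-- B's candidate pair at split point `i`. -/
def candB (xs : List Int) (i : Int) : Int × Int :=
  (|PySem.Int.floordiv (xs.sum - (xs.drop i.toNat).sum) i -
     PySem.Int.floordiv ((xs.drop i.toNat).sum) ((xs.length : Int) - i)|, i)

/-- A's forward loop, with its running sums resolved, is the `stepS` fold over B's
candidate pairs. -/
theorem loopA_eq (xs : List Int) :
    ∀ (m : Nat) (a : Int) (st : Option Int × Int),
      1 ≤ a → a + m = (xs.length : Int) →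
      ((PySem.List.pyRange a (xs.length : Int) 1).foldl (stepA xs (xs.length : Int))
        ((xs.take (a - 1).toNat).sum, xs.sum - (xs.take (a - 1).toNat).sum, st.1, st.2)).2.2
      = ((PySem.List.pyRange a (xs.length : Int) 1).map (candB xs)).foldl stepS st := by
  intro m
  induction m with
  | zero =>
    intro a st h1 h2
    rw [PySem.List.pyRange_one_eq_nil (by omega)]
    simp
  | succ m ih =>
    intro a st h1 h2
    have ha : a < (xs.length : Int) := by omega
    rw [PySem.List.pyRange_one_cons ha]
    simp only [List.foldl_cons, List.map_cons, stepA, stepS]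
    have hxa : PySem.List.pyGetD xs (a - 1) 0 = xs.getD (a - 1).toNat 0 := by
      rw [PySem.List.pyGetD_eq_getElem xs 0 (by omega) (by omega)]
      have h3 : a.toNat - 1 < xs.length := by omega
      simp [List.getD_eq_getElem?_getD, List.getElem?_eq_getElem h3]
    have hleft : (xs.take (a - 1).toNat).sum + PySem.List.pyGetD xs (a - 1) 0
        = (xs.take a.toNat).sum := by
      rw [hxa]
      have h3 : (a - 1).toNat + 1 = a.toNat := by omega
      rw [← h3, sum_take_succ_getD xs (a - 1).toNat (by omega)]
    have hsplit : (xs.take a.toNat).sum + (xs.drop a.toNat).sum = xs.sum := by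
      rw [← List.sum_append, List.take_append_drop]
    have hd2 : xs.sum - (xs.take (a - 1).toNat).sum - PySem.List.pyGetD xs (a - 1) 0
        = xs.sum - (xs.take a.toNat).sum := by omega
    have hdropsum : (xs.drop a.toNat).sum = xs.sum - (xs.take a.toNat).sum := by omega
    have hcand : candB xs a
        = (|PySem.Int.floordiv ((xs.take a.toNat).sum) a -
            PySem.Int.floordiv (xs.sum - (xs.take a.toNat).sum) ((xs.length : Int) - a)|, a) := by
      simp only [candB, hdropsum, sub_sub_cancel]
    rw [hleft, hd2, hcand]
    set nt := |PySem.Int.floordiv (xs.take a.toNat).sum a -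
        PySem.Int.floordiv (xs.sum - (xs.take a.toNat).sum) ((xs.length : Int) - a)| with hnt
    have step : ∀ st' : Option Int × Int,
        ((PySem.List.pyRange (a + 1) (xs.length : Int) 1).foldl (stepA xs (xs.length : Int))
          ((xs.take a.toNat).sum, xs.sum - (xs.take a.toNat).sum, st'.1, st'.2)).2.2
        = ((PySem.List.pyRange (a + 1) (xs.length : Int) 1).map (candB xs)).foldl stepS st' := by
      intro st'
      have := ih (a + 1) st' (by omega) (by omega)
      simpa [show a + 1 - 1 = a from by ring] using this
    obtain ⟨b, mo⟩ := st
    cases b with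
    | none =>
      rw [if_pos rfl, if_pos rfl]
      exact step (some nt, a)
    | some v =>
      by_cases h : nt < v
      · rw [if_pos (by simpa using h), if_pos (by simpa using h)]
        exact step (some nt, a)
      · rw [if_neg (by simpa using h), if_neg (by simpa using h)]
        exact step (some v, mo)

/-- On a candidate list with strictly increasing months, A's strict-update selection
and B's first-lexicographic-minimum selection pick the same month. -/
theorem sel_eq (l : List (Int × Int)) :
    ∀ (b : Option Int) (mo : Int),
      l.Pairwise (fun c d => c.2 < d.2) →
      (match b with | none => mo = -1 | some _ => ∀ c ∈ l, mo < c.2) →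
      (l.foldl stepS (b, mo)).2
        = match l.foldl stepM (b.map (fun v => (v, mo))) with
          | none => (-1 : Int) | some c => c.2 := by
  induction l with
  | nil =>
    intro b mo _ hb
    cases b with
    | none => simpa using hb
    | some v => simp
  | cons c t ih =>
    intro b mo hp hb
    have hhead := List.pairwise_cons.mp hp
    simp only [List.foldl_cons]
    cases b with
    | none =>
      have h1 : stepS (none, mo) c = (some c.1, c.2) := by simp [stepS]
      have h2 : stepM (Option.map (fun v => (v, mo)) none) c = some c := by simp [stepM]
      rw [h1, h2]
      have := ih (some c.1) c.2 hhead.2 (fun d hd => hhead.1 d hd)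
      simpa using this
    | some v =>
      have hmo : ∀ d ∈ c :: t, mo < d.2 := hb
      have hcnot : ¬ (c.2 < mo) := by
        have := hmo c (by simp)
        omega
      by_cases hlt : c.1 < v
      · have h1 : stepS (some v, mo) c = (some c.1, c.2) := by simp [stepS, hlt]
        have h2 : stepM (Option.map (fun v => (v, mo)) (some v)) c = some c := by
          simp [stepM, hlt]
        rw [h1, h2]
        have := ih (some c.1) c.2 hhead.2 (fun d hd => hhead.1 d hd)
        simpa using this
      · have h1 : stepS (some v, mo) c = (some v, mo) := by simp [stepS, hlt]
        have h2 : stepM (Option.map (fun v => (v, mo)) (some v)) c = some (v, mo) := by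
          simp [stepM, hlt, hcnot]
        rw [h1, h2]
        have := ih (some v) mo hhead.2 (fun d hd => hmo d (List.mem_cons_of_mem _ hd))
        simpa using this

/-- range(a, b) is strictly increasing. -/
theorem pyRange_one_pairwise (b : Int) :
    ∀ (m : Nat) (a : Int), a + m = b → (PySem.List.pyRange a b 1).Pairwise (· < ·) := by
  intro m
  induction m with
  | zero =>
    intro a h
    rw [PySem.List.pyRange_one_eq_nil (by omega)]
    exact List.Pairwise.nil
  | succ m ih =>
    intro a h
    rw [PySem.List.pyRange_one_cons (by omega)]
    refine List.pairwise_cons.mpr ⟨?_, ih (a + 1) (by omega)⟩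
    intro j hj
    have := PySem.List.mem_pyRange_one.mp hj
    omega

theorem findEarliestMonth_eq (xs : List Int) : findEarliestMonth xs = findEarliestMonth_alt xs := by
  have hsuf : xs.reverse.foldl (fun acc p => acc ++ [PySem.List.pyGetD acc (-1) 0 + p]) [0]
      = 0 :: psums 0 xs.reverse := by
    have := prefix_fold xs.reverse [] 0
    simpa using this
  have hlen : ((0 :: psums 0 xs.reverse).reverse).length = xs.length + 1 := by
    simp [psums_length]
  have hget : ∀ i : Int, 1 ≤ i → i < (xs.length : Int) →
      PySem.List.pyGetD ((0 :: psums 0 xs.reverse).reverse) i 0 = (xs.drop i.toNat).sum := by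
    intro i h1 h2
    rw [PySem.List.pyGetD_eq_getElem _ 0 (by omega) (by rw [hlen]; push_cast; omega)]
    have h3 : i.toNat < ((0 :: psums 0 xs.reverse).reverse).length := by omega
    have := suffix_getD xs i.toNat (by omega)
    rw [List.getD_eq_getElem _ _ h3] at this
    exact this
  have hmap : (PySem.List.pyRange 1 (xs.length : Int) 1).map (fun i =>
      (|PySem.Int.floordiv
          (xs.sum - PySem.List.pyGetD ((0 :: psums 0 xs.reverse).reverse) i 0) i -
        PySem.Int.floordiv (PySem.List.pyGetD ((0 :: psums 0 xs.reverse).reverse) i 0)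
          ((xs.length : Int) - i)|, i))
      = (PySem.List.pyRange 1 (xs.length : Int) 1).map (candB xs) := by
    apply List.map_congr_left
    intro i hi
    have hi' := PySem.List.mem_pyRange_one.mp hi
    rw [hget i (by omega) (by omega)]
    rfl
  simp only [findEarliestMonth, findEarliestMonth_alt, hsuf]
  rw [hmap]
  by_cases hn : xs.length = 0
  · rw [PySem.List.pyRange_one_eq_nil (by simp [hn])]
    rfl
  · have h1 : 1 + ((xs.length - 1 : Nat) : Int) = (xs.length : Int) := by omega
    have hA := loopA_eq xs (xs.length - 1) 1 (.none, -1) (by omega) h1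
    have hA' : ((PySem.List.pyRange 1 (xs.length : Int) 1).foldl (stepA xs (xs.length : Int))
        (0, xs.sum, .none, -1)).2.2
        = ((PySem.List.pyRange 1 (xs.length : Int) 1).map (candB xs)).foldl stepS (.none, -1) := by
      simpa using hA
    have hpair : (((PySem.List.pyRange 1 (xs.length : Int) 1).map (candB xs))).Pairwise
        (fun c d => c.2 < d.2) := by
      refine List.pairwise_map.mpr ?_
      exact (pyRange_one_pairwise (xs.length : Int) (xs.length - 1) 1 h1).imp (fun h => h)
    have hS := sel_eq ((PySem.List.pyRange 1 (xs.length : Int) 1).map (candB xs))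
      .none (-1) hpair rfl
    have hM : PySem.List.min2? ((PySem.List.pyRange 1 (xs.length : Int) 1).map (candB xs))
        (fun c => c.1) (fun c => c.2)
        = ((PySem.List.pyRange 1 (xs.length : Int) 1).map (candB xs)).foldl stepM none := by
      unfold PySem.List.min2? stepM
      congr 1
      funext acc x
      cases acc <;> rfl
    rw [hM]
    rw [show ((PySem.List.pyRange 1 (xs.length : Int) 1).foldl (stepA xs (xs.length : Int))
        (0, xs.sum, .none, -1)).2.2.2
      = (((PySem.List.pyRange 1 (xs.length : Int) 1).foldl (stepA xs (xs.length : Int))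
        (0, xs.sum, .none, -1)).2.2).2 from rfl, hA']
    simpa using hS

-- ===== VERDICT (by name: the statement is the Claim_ definition above) =====
theorem findEarliestMonth_spec : Claim_equal_findEarliestMonth := by
  intro xs _
  unfold Spec_findEarliestMonth
  exact findEarliestMonth_eq xs
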